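-- pv_equiv track=rewrite | github.com/YinanDanielZhou/CyclicSubgroups | Z_groups.py | generate_multiplicative_group
-- ===== SOURCE A (Python) =====
-- def gcd(a, b):
--     while b:
--         a, b = b, a % b
--     return a
--
-- def generate_multiplicative_group(n):
--     if n <= 0:
--         return "n must be a positive integer"
--
--     group = []
--     for i in range(1, n):
--         if gcd(i, n) == 1:
--             group.append(i)
--
--     return group
-- ===== SOURCE B (Python) =====
-- def generate_multiplicative_group(n):
--     if n <= 0:
--         return "n must be a positive integer"
--
--     removed = [False] * n
--     for d in range(2, n):
--         if n % d == 0: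
--             for m in range(d, n, d):
--                 removed[m] = True
--
--     return [i for i in range(1, n) if not removed[i]]
-- ===== Notes on version B (the rewrite author's own statement) =====
-- stated objective: alternative
-- what changed: Replaced the per-element Euclidean gcd test with a sieve: mark the multiples of every divisor d of n in a boolean array, then collect the unmarked indices 1..n-1.
-- outside the precondition, e.g. on generate_multiplicative_group(0): A returns 'n must be a positive integer', B returns 'n must be a positive integer'; on generate_multiplicative_group(-3): A returns 'n must be a positive integer', B returns 'n must be a positive integer'
import Mathlib
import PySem

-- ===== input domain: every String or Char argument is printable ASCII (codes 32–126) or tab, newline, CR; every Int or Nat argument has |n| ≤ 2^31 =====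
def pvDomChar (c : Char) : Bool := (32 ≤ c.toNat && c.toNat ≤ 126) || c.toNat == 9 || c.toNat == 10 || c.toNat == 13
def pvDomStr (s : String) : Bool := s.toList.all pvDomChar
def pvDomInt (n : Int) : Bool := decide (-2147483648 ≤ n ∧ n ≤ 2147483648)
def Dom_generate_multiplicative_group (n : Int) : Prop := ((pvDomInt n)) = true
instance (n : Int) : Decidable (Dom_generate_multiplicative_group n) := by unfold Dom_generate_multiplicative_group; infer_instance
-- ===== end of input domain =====

-- B replaces the per-element Euclidean-gcd test with a sieve marking the multiples of each
-- divisor d of n (a different algorithm; a timing run measures the speed difference).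
-- For n ≤ 0 the Python A returns a STRING, not a list — excluded by Pre_ (B returns the same string there).

-- ===== PORT A =====
-- termination helper for the while-loop of gcd (cited by the port's decreasing_by)
theorem pyMod_natAbs_lt (a b : Int) (h : b ≠ 0) : (PySem.Int.mod a b).natAbs < b.natAbs := by
  rcases lt_or_gt_of_ne h with hb | hb
  · have h1 := PySem.Int.mod_neg_bounds a hb
    omega
  · have h1 := PySem.Int.mod_nonneg a hb
    have h2 := PySem.Int.mod_lt a hb
    omega

-- while b: a, b = b, a % b ; return a
def pyGcd (a b : Int) : Int :=
  if _h : b = 0 then a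
  else pyGcd b (PySem.Int.mod a b)
termination_by b.natAbs
decreasing_by exact pyMod_natAbs_lt a b _h

def generate_multiplicative_group (n : Int) : List Int :=
  -- the n ≤ 0 branch returns a string in Python and is outside Pre_
  (PySem.List.pyRange 1 n 1).foldl
    (fun group i => if pyGcd i n = 1 then group ++ [i] else group) []

-- ===== PORT B =====
def generate_multiplicative_group_alt (n : Int) : List Int :=
  -- the n ≤ 0 branch returns a string in Python and is outside Pre_
  let removed : List Bool := List.replicate n.toNat false
  let removed :=
    (PySem.List.pyRange 2 n 1).foldl
      (fun r d =>
        if PySem.Int.mod n d = 0 then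
          (PySem.List.pyRange d n d).foldl (fun r m => PySem.List.pySetD r m true) r
        else r)
      removed
  (PySem.List.pyRange 1 n 1).foldl
    (fun acc i => if PySem.List.pyGet? removed i = some false then acc ++ [i] else acc) []

-- ===== PRECONDITION & SPEC =====
-- Pre_ excludes n ≤ 0, where A returns the string "n must be a positive integer" instead of a list of ints (B returns the same string).
def Pre_generate_multiplicative_group (n : Int) : Prop := 1 ≤ n
instance (n : Int) : Decidable (Pre_generate_multiplicative_group n) := by
  unfold Pre_generate_multiplicative_group; infer_instance

def pvWitness_generate_multiplicative_group : Int := 10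

def Spec_generate_multiplicative_group (n : Int) (out : List Int) : Prop := out = generate_multiplicative_group_alt n
instance (n : Int) (out : List Int) : Decidable (Spec_generate_multiplicative_group n out) := by unfold Spec_generate_multiplicative_group; infer_instance

-- ===== CLAIM (what is proved, stated in full; the proofs are below) =====
def Claim_equal_generate_multiplicative_group : Prop := ∀ (n : Int), Dom_generate_multiplicative_group n → Pre_generate_multiplicative_group n → Spec_generate_multiplicative_group n (generate_multiplicative_group n)

-- ===== LEMMAS AND PROOFS =====

-- pyGcd on nonnegative arguments is the mathematical gcd
theorem pyGcd_nat (y x : Nat) : pyGcd (x : Int) (y : Int) = (Nat.gcd y x : Int) := by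
  induction y using Nat.strong_induction_on generalizing x with
  | _ y ih =>
    rcases Nat.eq_zero_or_pos y with hy | hy
    · subst hy; rw [pyGcd]; simp
    · rw [pyGcd]
      have hyne : (y : Int) ≠ 0 := by omega
      rw [dif_neg hyne]
      have hmod : PySem.Int.mod (x : Int) (y : Int) = ((x % y : Nat) : Int) := by
        rw [PySem.Int.mod_eq_emod_of_pos (by omega)]
        exact_mod_cast Int.natCast_mod x y
      rw [hmod, ih (x % y) (Nat.mod_lt x hy) y]
      exact congrArg _ (Nat.gcd_rec y x).symm

theorem pyGcd_eq_gcd (a b : Int) (ha : 0 ≤ a) (hb : 0 ≤ b) :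
    pyGcd a b = (Int.gcd a b : Int) := by
  have h1 : a = (a.toNat : Int) := by omega
  have h2 : b = (b.toNat : Int) := by omega
  rw [h1, h2, pyGcd_nat, Int.gcd_natCast_natCast, Nat.gcd_comm]

-- inner sieve loop: reading index i after setting every index in ms to true
theorem foldl_pySetD_get (ms : List Int) (r : List Bool) (i : Int)
    (hi : 0 ≤ i) (hms : ∀ m ∈ ms, 0 ≤ m) :
    PySem.List.pyGet? (ms.foldl (fun r m => PySem.List.pySetD r m true) r) i =
      if i ∈ ms ∧ i < (r.length : Int) then some true else PySem.List.pyGet? r i := by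
  induction ms generalizing r with
  | nil => simp
  | cons m ms ih =>
    have hm : 0 ≤ m := hms m (by simp)
    simp only [List.foldl_cons]
    rw [ih (PySem.List.pySetD r m true) (fun x hx => hms x (by simp [hx]))]
    rw [PySem.List.length_pySetD, PySem.List.pySetD_of_nonneg r true hm,
        PySem.List.pyGet?_of_nonneg r hi, PySem.List.pyGet?_of_nonneg _ hi,
        List.getElem?_set]
    by_cases hmem : i ∈ ms ∧ i < (r.length : Int)
    · simp [hmem, List.mem_cons.mpr (Or.inr hmem.1)]
    · rw [if_neg hmem]
      by_cases heq : i = m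
      · subst heq
        by_cases hlt : i < (r.length : Int)
        · have : i.toNat < r.length := by omega
          simp [this, hlt]
        · have : ¬ i.toNat < r.length := by omega
          simp [this, hlt]
      · have hne : ¬ m.toNat = i.toNat := by omega
        rw [if_neg hne]
        simp only [List.mem_cons]
        rw [if_neg]
        rintro ⟨hin | hin, hlt⟩
        · exact heq hin
        · exact hmem ⟨hin, hlt⟩

theorem foldl_pySetD_length (ms : List Int) (r : List Bool) :
    (ms.foldl (fun r m => PySem.List.pySetD r m true) r).length = r.length := by
  induction ms generalizing r with
  | nil => rfl
  | cons m ms ih => simp [List.foldl_cons, ih, PySem.List.length_pySetD]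

-- splitting an existential over a cons
theorem exists_mem_cons_split (d : Int) (ds : List Int) (P : Int → Prop) :
    (∃ x ∈ d :: ds, P x) ↔ (P d ∨ ∃ x ∈ ds, P x) := by
  simp [List.mem_cons, or_and_right, exists_or]

-- outer sieve loop characterisation
theorem sieve_get (n : Int) (ds : List Int) (r : List Bool) (i : Int)
    (hi : 0 ≤ i) (hds : ∀ d ∈ ds, 0 < d) :
    PySem.List.pyGet?
      (ds.foldl
        (fun r d =>
          if PySem.Int.mod n d = 0 then
            (PySem.List.pyRange d n d).foldl (fun r m => PySem.List.pySetD r m true) r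
          else r) r) i =
      if (∃ d ∈ ds, PySem.Int.mod n d = 0 ∧ i ∈ PySem.List.pyRange d n d) ∧ i < (r.length : Int)
      then some true else PySem.List.pyGet? r i := by
  induction ds generalizing r with
  | nil => simp
  | cons d ds ih =>
    have hd : 0 < d := hds d (by simp)
    simp only [List.foldl_cons]
    rw [ih _ (fun x hx => hds x (by simp [hx]))]
    simp only [exists_mem_cons_split]
    by_cases hdvd : PySem.Int.mod n d = 0
    · rw [if_pos hdvd, foldl_pySetD_length,
          foldl_pySetD_get _ _ _ hi
            (fun m hm => le_of_lt (((PySem.List.mem_pyRange_iff_of_pos hd m).mp hm).1.trans_lt' hd))]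
      by_cases hlt : i < (r.length : Int)
      · by_cases he : ∃ d ∈ ds, PySem.Int.mod n d = 0 ∧ i ∈ PySem.List.pyRange d n d
        · simp [he, hlt, hdvd]
        · by_cases hm : i ∈ PySem.List.pyRange d n d
          · simp [he, hlt, hdvd, hm]
          · simp [he, hlt, hdvd, hm]
      · simp [hlt]
    · rw [if_neg hdvd]
      simp [hdvd]

-- number-theoretic core: the sieve condition is exactly "gcd(i, n) ≠ 1"
theorem sieve_cond_iff (n i : Int) (hi1 : 1 ≤ i) (hin : i < n) :
    (∃ d ∈ PySem.List.pyRange 2 n 1, PySem.Int.mod n d = 0 ∧ i ∈ PySem.List.pyRange d n d) ↔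
      Int.gcd i n ≠ 1 := by
  constructor
  · rintro ⟨d, hd, hdvdn, hmem⟩
    rw [PySem.List.mem_pyRange_one] at hd
    have hd0 : 0 < d := by omega
    rw [PySem.List.mem_pyRange_iff_of_pos hd0] at hmem
    have hdvdn' : d ∣ n := (PySem.Int.mod_eq_zero_iff_dvd n d).mp hdvdn
    have hdvdi : d ∣ i := by
      obtain ⟨k, hk⟩ := hmem.2.2
      exact ⟨k + 1, by rw [mul_add, mul_one]; omega⟩
    have hgd : d ∣ (Int.gcd i n : Int) := Int.dvd_coe_gcd hdvdi hdvdn'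
    have hg0 : Int.gcd i n ≠ 0 := by
      simp only [ne_eq, Int.gcd_eq_zero_iff]; omega
    have hle : d ≤ (Int.gcd i n : Int) := Int.le_of_dvd (by omega) hgd
    omega
  · intro hg
    have hg0 : Int.gcd i n ≠ 0 := by
      simp only [ne_eq, Int.gcd_eq_zero_iff]; omega
    set g : Int := (Int.gcd i n : Int) with hgdef
    have hg2 : 2 ≤ g := by omega
    have hgi : g ∣ i := Int.gcd_dvd_left i n
    have hgn : g ∣ n := Int.gcd_dvd_right i n
    have hgle : g ≤ i := Int.le_of_dvd (by omega) hgi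
    refine ⟨g, ?_, ?_, ?_⟩
    · rw [PySem.List.mem_pyRange_one]; omega
    · exact (PySem.Int.mod_eq_zero_iff_dvd n g).mpr hgn
    · rw [PySem.List.mem_pyRange_iff_of_pos (by omega)]
      exact ⟨hgle, hin, dvd_sub hgi (dvd_refl g)⟩

-- ===== VERDICT (by name: the statement is the Claim_ definition above) =====
theorem generate_multiplicative_group_spec : Claim_equal_generate_multiplicative_group := by
  intro n _ hpre
  unfold Spec_generate_multiplicative_group
  unfold generate_multiplicative_group generate_multiplicative_group_alt
  rw [PySem.List.foldl_append_ite_eq_filter (fun i => pyGcd i n = 1),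
      PySem.List.foldl_append_ite_eq_filter (fun i =>
        PySem.List.pyGet?
          ((PySem.List.pyRange 2 n 1).foldl
            (fun r d =>
              if PySem.Int.mod n d = 0 then
                (PySem.List.pyRange d n d).foldl (fun r m => PySem.List.pySetD r m true) r
              else r)
            (List.replicate n.toNat false)) i = some false)]
  simp only [List.nil_append]
  apply List.filter_congr
  intro i hi
  rw [PySem.List.mem_pyRange_one] at hi
  have hn1 : 1 ≤ n := hpre
  have hi0 : 0 ≤ i := by omega
  rw [sieve_get n _ _ i hi0
        (fun d hd => by rw [PySem.List.mem_pyRange_one] at hd; omega)]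
  rw [List.length_replicate,
      PySem.List.pyGet?_of_nonneg _ hi0, List.getElem?_replicate,
      if_pos (by omega : i.toNat < n.toNat)]
  have hlen : i < (n.toNat : Int) := by omega
  rw [pyGcd_eq_gcd i n hi0 (by omega)]
  simp only [decide_eq_decide]
  by_cases hcond : ∃ d ∈ PySem.List.pyRange 2 n 1,
      PySem.Int.mod n d = 0 ∧ i ∈ PySem.List.pyRange d n d
  · rw [if_pos ⟨hcond, hlen⟩]
    have := (sieve_cond_iff n i hi.1 hi.2).mp hcond
    constructor
    · intro h; exact absurd (by exact_mod_cast h) this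
    · intro h; exact absurd h (by simp)
  · rw [if_neg (fun h => hcond h.1)]
    have := (sieve_cond_iff n i hi.1 hi.2).not.mp hcond
    push Not at this
    constructor
    · intro _; rfl
    · intro _; exact_mod_cast congrArg (Nat.cast : Nat → Int) this
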